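-- pv_equiv track=rewrite | github.com/cutehammond772/problem-solving-archive | 백준/Gold/2602. 돌다리 건너기/돌다리 건너기.py | solve
-- ===== SOURCE A (Python) =====
-- def solve(S, A, B):
-- 	N, L = len(S), len(A)
--
-- 	dpA = [[0] * (N + 1) for _ in range(L + 1)]
-- 	dpB = [[0] * (N + 1) for _ in range(L + 1)]
--
-- 	# 시작점
-- 	for i in range(1, L + 1):
-- 		dpA[i][1] = dpA[i - 1][1]
-- 		dpB[i][1] = dpB[i - 1][1]
--
-- 		if S[0] == A[i - 1]:
-- 			dpA[i][1] += 1
--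
-- 		if S[0] == B[i - 1]:
-- 			dpB[i][1] += 1
--
-- 	for k in range(2, N + 1):
-- 		for i in range(1, L + 1):
-- 			dpA[i][k] = dpA[i - 1][k]
-- 			dpB[i][k] = dpB[i - 1][k]
--
-- 			if S[k - 1] == A[i - 1]:
-- 				dpA[i][k] += dpB[i - 1][k - 1]
--
-- 			if S[k - 1] == B[i - 1]:
-- 				dpB[i][k] += dpA[i - 1][k - 1]
--
-- 	return dpA[L][N] + dpB[L][N]
-- ===== SOURCE B (Python) =====
-- def solve(S, A, B):
--     N, L = len(S), len(A)
--     if N == 0 or L == 0: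
--         return 0
--     # rowA[i] / rowB[i]: number of paths landing EXACTLY on row i of A / B at the
--     # current stone; prefix sums are rescanned per entry instead of kept cumulative.
--     rowA = [1 if S[0] == A[i] else 0 for i in range(L)]
--     rowB = [1 if S[0] == B[i] else 0 for i in range(L)]
--     for k in range(1, N):
--         rowA, rowB = (
--             [(1 if S[k] == A[i] else 0) * sum(rowB[:i]) for i in range(L)],
--             [(1 if S[k] == B[i] else 0) * sum(rowA[:i]) for i in range(L)],
--         )
--     return sum(rowA) + sum(rowB)
-- ===== Notes on version B (the rewrite author's own statement) =====
-- stated objective: alternative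
-- what changed: A keeps cumulative 2D tables dp[i][k] = prefix-sum over rows maintained by a running accumulator; B keeps per-stone rows of exact-landing counts and rescans the prefix sum rowB[:i]/rowA[:i] for each entry, keeping only the previous rows.
import Mathlib
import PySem

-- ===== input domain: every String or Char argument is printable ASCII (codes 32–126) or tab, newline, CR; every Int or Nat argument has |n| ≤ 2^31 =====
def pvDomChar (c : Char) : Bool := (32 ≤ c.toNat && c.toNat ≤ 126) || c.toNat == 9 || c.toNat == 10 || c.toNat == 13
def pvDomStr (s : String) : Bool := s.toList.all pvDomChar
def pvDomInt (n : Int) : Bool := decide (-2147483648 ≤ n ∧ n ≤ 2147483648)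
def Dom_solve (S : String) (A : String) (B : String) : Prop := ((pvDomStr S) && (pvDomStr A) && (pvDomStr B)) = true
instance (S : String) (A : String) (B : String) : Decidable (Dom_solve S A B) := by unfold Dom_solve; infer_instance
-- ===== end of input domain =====

-- B replaces A's in-table cumulative DP (dp[i][k] = running prefix sum over rows) by
-- exact-landing rows whose prefix sums are rescanned per entry; objective: alternative.

-- ===== PORT A =====
-- A's tables dpA/dpB are modelled as zero-initialised functions Nat → Nat → Int;
-- the assignment dp[i][k] = v becomes a pointwise functional update (exact for the
-- in-range indices A touches; out-of-range accesses raise in Python → outside Pre_solve).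
def aStep1 (s a b : List Char)
    (st : (Nat → Nat → Int) × (Nat → Nat → Int)) (i0 : Nat) :
    (Nat → Nat → Int) × (Nat → Nat → Int) :=
  let i := i0 + 1
  let vA := st.1 (i-1) 1 + (if s.getD 0 ' ' = a.getD (i-1) ' ' then (1:Int) else 0)
  let vB := st.2 (i-1) 1 + (if s.getD 0 ' ' = b.getD (i-1) ' ' then (1:Int) else 0)
  (fun i' k' => if i' = i ∧ k' = 1 then vA else st.1 i' k',
   fun i' k' => if i' = i ∧ k' = 1 then vB else st.2 i' k')

def aStep2 (s a b : List Char) (k : Nat)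
    (st : (Nat → Nat → Int) × (Nat → Nat → Int)) (i0 : Nat) :
    (Nat → Nat → Int) × (Nat → Nat → Int) :=
  let i := i0 + 1
  let vA := st.1 (i-1) k + (if s.getD (k-1) ' ' = a.getD (i-1) ' ' then st.2 (i-1) (k-1) else 0)
  let vB := st.2 (i-1) k + (if s.getD (k-1) ' ' = b.getD (i-1) ' ' then st.1 (i-1) (k-1) else 0)
  (fun i' k' => if i' = i ∧ k' = k then vA else st.1 i' k',
   fun i' k' => if i' = i ∧ k' = k then vB else st.2 i' k')

def aOuter (s a b : List Char)
    (st : (Nat → Nat → Int) × (Nat → Nat → Int)) (k0 : Nat) :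
    (Nat → Nat → Int) × (Nat → Nat → Int) :=
  (List.range a.length).foldl (aStep2 s a b (k0 + 2)) st

def solve (S : String) (A : String) (B : String) : Int :=
  let s := S.toList
  let a := A.toList
  let b := B.toList
  let st1 := (List.range a.length).foldl (aStep1 s a b) (fun _ _ => (0:Int), fun _ _ => (0:Int))
  let fin := (List.range (s.length - 1)).foldl (aOuter s a b) st1
  fin.1 a.length s.length + fin.2 a.length s.length

-- ===== PORT B =====
def altBase (s a b : List Char) : List Int × List Int :=
  ((List.range a.length).map (fun i => if s.getD 0 ' ' = a.getD i ' ' then (1:Int) else 0),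
   (List.range a.length).map (fun i => if s.getD 0 ' ' = b.getD i ' ' then (1:Int) else 0))

def altStep (s a b : List Char) (st : List Int × List Int) (k0 : Nat) : List Int × List Int :=
  ((List.range a.length).map
      (fun i => (if s.getD (k0+1) ' ' = a.getD i ' ' then (1:Int) else 0) * (st.2.take i).sum),
   (List.range a.length).map
      (fun i => (if s.getD (k0+1) ' ' = b.getD i ' ' then (1:Int) else 0) * (st.1.take i).sum))

def solve_alt (S : String) (A : String) (B : String) : Int :=
  let s := S.toList
  let a := A.toList
  let b := B.toList
  if s.length = 0 ∨ a.length = 0 then 0 else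
    let p := (List.range (s.length - 1)).foldl (altStep s a b) (altBase s a b)
    p.1.sum + p.2.sum

-- ===== PRECONDITION & SPEC =====
-- Pre_solve excludes exactly the inputs on which Python A raises IndexError:
-- A nonempty with S empty (it indexes column 1 of a 1-column table), or A longer than B
-- (it indexes B past its end).
def Pre_solve (S : String) (A : String) (B : String) : Prop :=
  A.toList = [] ∨ (S.toList ≠ [] ∧ A.toList.length ≤ B.toList.length)
instance (S : String) (A : String) (B : String) : Decidable (Pre_solve S A B) := by
  unfold Pre_solve; infer_instance

def pvWitness_solve : String × String × String := ("abc", "ab", "ba")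

def Spec_solve (S : String) (A : String) (B : String) (out : Int) : Prop := out = solve_alt S A B
instance (S : String) (A : String) (B : String) (out : Int) : Decidable (Spec_solve S A B out) := by unfold Spec_solve; infer_instance

-- ===== CLAIM (what is proved, stated in full; the proofs are below) =====
def Claim_equal_solve : Prop := ∀ (S : String) (A : String) (B : String), Dom_solve S A B → Pre_solve S A B → Spec_solve S A B (solve S A B)

-- ===== LEMMAS AND PROOFS =====

-- columns of B's computation: colsP n = B's (rowA, rowB) after n loop iterations
def colsP (s a b : List Char) (n : Nat) : List Int × List Int :=
  (List.range n).foldl (altStep s a b) (altBase s a b)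

-- A's states: after j iterations of the first loop / inner loop / outer loop
def st1At (s a b : List Char) (j : Nat) : (Nat → Nat → Int) × (Nat → Nat → Int) :=
  (List.range j).foldl (aStep1 s a b) (fun _ _ => (0:Int), fun _ _ => (0:Int))
def innerAt (s a b : List Char) (k : Nat)
    (st : (Nat → Nat → Int) × (Nat → Nat → Int)) (j : Nat) :
    (Nat → Nat → Int) × (Nat → Nat → Int) :=
  (List.range j).foldl (aStep2 s a b k) st
def outerAt (s a b : List Char) (m : Nat) : (Nat → Nat → Int) × (Nat → Nat → Int) :=
  (List.range m).foldl (aOuter s a b) (st1At s a b a.length)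

theorem colsP_succ (s a b : List Char) (n : Nat) :
    colsP s a b (n+1) = altStep s a b (colsP s a b n) n := by
  simp [colsP, List.range_succ]

theorem colsP_len1 (s a b : List Char) (n : Nat) : (colsP s a b n).1.length = a.length := by
  cases n with
  | zero => simp [colsP, altBase]
  | succ m => rw [colsP_succ]; simp [altStep]

theorem colsP_len2 (s a b : List Char) (n : Nat) : (colsP s a b n).2.length = a.length := by
  cases n with
  | zero => simp [colsP, altBase]
  | succ m => rw [colsP_succ]; simp [altStep]

theorem colsP_zero_get1 (s a b : List Char) (i : Nat) (hi : i < a.length) :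
    (colsP s a b 0).1.getD i 0 = (if s.getD 0 ' ' = a.getD i ' ' then (1:Int) else 0) := by
  simp [colsP, altBase, List.getD_eq_getElem?_getD, List.getElem?_eq_getElem, hi]

theorem colsP_zero_get2 (s a b : List Char) (i : Nat) (hi : i < a.length) :
    (colsP s a b 0).2.getD i 0 = (if s.getD 0 ' ' = b.getD i ' ' then (1:Int) else 0) := by
  simp [colsP, altBase, List.getD_eq_getElem?_getD, List.getElem?_eq_getElem, hi]

theorem colsP_succ_get1 (s a b : List Char) (n i : Nat) (hi : i < a.length) :
    (colsP s a b (n+1)).1.getD i 0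
      = (if s.getD (n+1) ' ' = a.getD i ' ' then (1:Int) else 0) * ((colsP s a b n).2.take i).sum := by
  rw [colsP_succ]
  simp [altStep, List.getD_eq_getElem?_getD, List.getElem?_eq_getElem, hi]

theorem colsP_succ_get2 (s a b : List Char) (n i : Nat) (hi : i < a.length) :
    (colsP s a b (n+1)).2.getD i 0
      = (if s.getD (n+1) ' ' = b.getD i ' ' then (1:Int) else 0) * ((colsP s a b n).1.take i).sum := by
  rw [colsP_succ]
  simp [altStep, List.getD_eq_getElem?_getD, List.getElem?_eq_getElem, hi]

theorem sum_take_succ_int (l : List Int) (i : Nat) (h : i < l.length) :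
    (l.take (i+1)).sum = (l.take i).sum + l.getD i 0 := by
  have h1 : l.take (i+1) = l.take i ++ [l[i]] := by
    rw [List.take_succ, List.getElem?_eq_getElem h]
    rfl
  rw [h1, List.sum_append, List.getD_eq_getElem l 0 h]
  simp

theorem first_inv (s a b : List Char) (j : Nat) (hj : j ≤ a.length) :
    (∀ i c, c ≠ 1 → (st1At s a b j).1 i c = 0 ∧ (st1At s a b j).2 i c = 0) ∧
    (∀ i, i ≤ j → (st1At s a b j).1 i 1 = ((colsP s a b 0).1.take i).sum ∧
                  (st1At s a b j).2 i 1 = ((colsP s a b 0).2.take i).sum) ∧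
    (∀ i, j < i → (st1At s a b j).1 i 1 = 0 ∧ (st1At s a b j).2 i 1 = 0) := by
  induction j with
  | zero =>
    refine ⟨fun i c _ => ⟨rfl, rfl⟩, fun i hi => ?_, fun i _ => ⟨rfl, rfl⟩⟩
    interval_cases i
    simp [st1At]
  | succ j ih =>
    have hj' : j ≤ a.length := Nat.le_of_succ_le hj
    obtain ⟨ihz, ihval, ihrest⟩ := ih hj'
    have hstep : st1At s a b (j+1) = aStep1 s a b (st1At s a b j) j := by
      simp [st1At, List.range_succ]
    have hjl : j < a.length := hj
    have hval : (st1At s a b (j+1)).1 (j+1) 1 = ((colsP s a b 0).1.take (j+1)).sum ∧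
                (st1At s a b (j+1)).2 (j+1) 1 = ((colsP s a b 0).2.take (j+1)).sum := by
      rw [hstep]
      constructor
      · show (if (j+1 = j+1 ∧ (1:Nat) = 1) then _ else _) = _
        rw [if_pos ⟨rfl, rfl⟩]
        rw [sum_take_succ_int _ j (by rw [colsP_len1]; exact hjl)]
        rw [colsP_zero_get1 s a b j hjl]
        simp [(ihval j le_rfl).1]
      · show (if (j+1 = j+1 ∧ (1:Nat) = 1) then _ else _) = _
        rw [if_pos ⟨rfl, rfl⟩]
        rw [sum_take_succ_int _ j (by rw [colsP_len2]; exact hjl)]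
        rw [colsP_zero_get2 s a b j hjl]
        simp [(ihval j le_rfl).2]
    refine ⟨?_, ?_, ?_⟩
    · intro i c hc
      rw [hstep]
      constructor
      · show (if (i = j+1 ∧ c = 1) then _ else _) = _
        rw [if_neg (fun h => hc h.2)]; exact (ihz i c hc).1
      · show (if (i = j+1 ∧ c = 1) then _ else _) = _
        rw [if_neg (fun h => hc h.2)]; exact (ihz i c hc).2
    · intro i hi
      rcases Nat.lt_or_ge i (j+1) with hlt | hge
      · have hij : i ≤ j := Nat.lt_succ_iff.mp hlt
        have hne : i ≠ j+1 := Nat.ne_of_lt hlt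
        rw [hstep]
        constructor
        · show (if (i = j+1 ∧ (1:Nat) = 1) then _ else _) = _
          rw [if_neg (fun h => hne h.1)]; exact (ihval i hij).1
        · show (if (i = j+1 ∧ (1:Nat) = 1) then _ else _) = _
          rw [if_neg (fun h => hne h.1)]; exact (ihval i hij).2
      · have : i = j+1 := Nat.le_antisymm hi hge
        subst this; exact hval
    · intro i hi
      have hne : i ≠ j+1 := by omega
      have hgt : j < i := by omega
      rw [hstep]
      constructor
      · show (if (i = j+1 ∧ (1:Nat) = 1) then _ else _) = _
        rw [if_neg (fun h => hne h.1)]; exact (ihrest i hgt).1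
      · show (if (i = j+1 ∧ (1:Nat) = 1) then _ else _) = _
        rw [if_neg (fun h => hne h.1)]; exact (ihrest i hgt).2

theorem inner_inv (s a b : List Char) (K' : Nat)
    (st : (Nat → Nat → Int) × (Nat → Nat → Int))
    (hA : ∀ i, i ≤ a.length → st.1 i (K'+1) = ((colsP s a b K').1.take i).sum)
    (hB : ∀ i, i ≤ a.length → st.2 i (K'+1) = ((colsP s a b K').2.take i).sum)
    (hz : ∀ i, st.1 i (K'+2) = 0 ∧ st.2 i (K'+2) = 0) :
    ∀ j, j ≤ a.length →
    (∀ i c, c ≠ K'+2 → (innerAt s a b (K'+2) st j).1 i c = st.1 i c ∧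
                       (innerAt s a b (K'+2) st j).2 i c = st.2 i c) ∧
    (∀ i, i ≤ j → (innerAt s a b (K'+2) st j).1 i (K'+2) = ((colsP s a b (K'+1)).1.take i).sum ∧
                  (innerAt s a b (K'+2) st j).2 i (K'+2) = ((colsP s a b (K'+1)).2.take i).sum) ∧
    (∀ i, j < i → (innerAt s a b (K'+2) st j).1 i (K'+2) = 0 ∧
                  (innerAt s a b (K'+2) st j).2 i (K'+2) = 0) := by
  intro j
  induction j with
  | zero =>
    intro _
    refine ⟨fun i c _ => ⟨rfl, rfl⟩, fun i hi => ?_, fun i _ => ⟨(hz i).1, (hz i).2⟩⟩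
    interval_cases i
    simpa [innerAt] using (hz 0)
  | succ j ih =>
    intro hj
    have hj' : j ≤ a.length := Nat.le_of_succ_le hj
    obtain ⟨ihz, ihval, ihrest⟩ := ih hj'
    have hjl : j < a.length := hj
    have hstep : innerAt s a b (K'+2) st (j+1) = aStep2 s a b (K'+2) (innerAt s a b (K'+2) st j) j := by
      simp [innerAt, List.range_succ]
    have hprevA : (innerAt s a b (K'+2) st j).1 j (K'+1) = ((colsP s a b K').1.take j).sum := by
      rw [(ihz j (K'+1) (by omega)).1]; exact hA j (Nat.le_of_lt hjl)
    have hprevB : (innerAt s a b (K'+2) st j).2 j (K'+1) = ((colsP s a b K').2.take j).sum := by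
      rw [(ihz j (K'+1) (by omega)).2]; exact hB j (Nat.le_of_lt hjl)
    have hcurA : (innerAt s a b (K'+2) st j).1 j (K'+2) = ((colsP s a b (K'+1)).1.take j).sum :=
      (ihval j le_rfl).1
    have hcurB : (innerAt s a b (K'+2) st j).2 j (K'+2) = ((colsP s a b (K'+1)).2.take j).sum :=
      (ihval j le_rfl).2
    have hval : (innerAt s a b (K'+2) st (j+1)).1 (j+1) (K'+2)
          = ((colsP s a b (K'+1)).1.take (j+1)).sum ∧
        (innerAt s a b (K'+2) st (j+1)).2 (j+1) (K'+2)
          = ((colsP s a b (K'+1)).2.take (j+1)).sum := by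
      rw [hstep]
      constructor
      · show (if (j+1 = j+1 ∧ K'+2 = K'+2) then _ else _) = _
        rw [if_pos ⟨rfl, rfl⟩]
        rw [sum_take_succ_int _ j (by rw [colsP_len1]; exact hjl)]
        rw [colsP_succ_get1 s a b K' j hjl]
        show (innerAt s a b (K'+2) st j).1 (j+1-1) (K'+2)
            + (if s.getD (K'+2-1) ' ' = a.getD (j+1-1) ' '
                then (innerAt s a b (K'+2) st j).2 (j+1-1) (K'+2-1) else 0) = _
        rw [show (j+1-1 : Nat) = j from rfl, show (K'+2-1 : Nat) = K'+1 from rfl]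
        rw [hcurA, hprevB]
        by_cases h : s.getD (K'+1) ' ' = a.getD j ' ' <;> simp [h]
      · show (if (j+1 = j+1 ∧ K'+2 = K'+2) then _ else _) = _
        rw [if_pos ⟨rfl, rfl⟩]
        rw [sum_take_succ_int _ j (by rw [colsP_len2]; exact hjl)]
        rw [colsP_succ_get2 s a b K' j hjl]
        show (innerAt s a b (K'+2) st j).2 (j+1-1) (K'+2)
            + (if s.getD (K'+2-1) ' ' = b.getD (j+1-1) ' '
                then (innerAt s a b (K'+2) st j).1 (j+1-1) (K'+2-1) else 0) = _
        rw [show (j+1-1 : Nat) = j from rfl, show (K'+2-1 : Nat) = K'+1 from rfl]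
        rw [hcurB, hprevA]
        by_cases h : s.getD (K'+1) ' ' = b.getD j ' ' <;> simp [h]
    refine ⟨?_, ?_, ?_⟩
    · intro i c hc
      rw [hstep]
      constructor
      · show (if (i = j+1 ∧ c = K'+2) then _ else _) = _
        rw [if_neg (fun h => hc h.2)]; exact (ihz i c hc).1
      · show (if (i = j+1 ∧ c = K'+2) then _ else _) = _
        rw [if_neg (fun h => hc h.2)]; exact (ihz i c hc).2
    · intro i hi
      rcases Nat.lt_or_ge i (j+1) with hlt | hge
      · have hij : i ≤ j := Nat.lt_succ_iff.mp hlt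
        have hne : i ≠ j+1 := Nat.ne_of_lt hlt
        rw [hstep]
        constructor
        · show (if (i = j+1 ∧ K'+2 = K'+2) then _ else _) = _
          rw [if_neg (fun h => hne h.1)]; exact (ihval i hij).1
        · show (if (i = j+1 ∧ K'+2 = K'+2) then _ else _) = _
          rw [if_neg (fun h => hne h.1)]; exact (ihval i hij).2
      · have : i = j+1 := Nat.le_antisymm hi hge
        subst this; exact hval
    · intro i hi
      have hne : i ≠ j+1 := by omega
      have hgt : j < i := by omega
      rw [hstep]
      constructor
      · show (if (i = j+1 ∧ K'+2 = K'+2) then _ else _) = _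
        rw [if_neg (fun h => hne h.1)]; exact (ihrest i hgt).1
      · show (if (i = j+1 ∧ K'+2 = K'+2) then _ else _) = _
        rw [if_neg (fun h => hne h.1)]; exact (ihrest i hgt).2

theorem outer_inv (s a b : List Char) (m : Nat) :
    (∀ i, i ≤ a.length → ∀ c, 1 ≤ c → c ≤ m+1 →
        (outerAt s a b m).1 i c = ((colsP s a b (c-1)).1.take i).sum ∧
        (outerAt s a b m).2 i c = ((colsP s a b (c-1)).2.take i).sum) ∧
    (∀ i c, c = 0 ∨ m+1 < c → (outerAt s a b m).1 i c = 0 ∧ (outerAt s a b m).2 i c = 0) := by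
  induction m with
  | zero =>
    obtain ⟨hz, hval, _⟩ := first_inv s a b a.length le_rfl
    refine ⟨?_, ?_⟩
    · intro i hi c hc1 hc2
      have : c = 1 := by omega
      subst this
      exact ⟨(hval i hi).1, (hval i hi).2⟩
    · intro i c hc
      exact hz i c (by omega)
  | succ m ih =>
    obtain ⟨ihval, ihz⟩ := ih
    have hstep : outerAt s a b (m+1)
        = innerAt s a b (m+2) (outerAt s a b m) a.length := by
      simp [outerAt, innerAt, aOuter, List.range_succ]
    have hinner := inner_inv s a b m (outerAt s a b m)
      (fun i hi => by simpa using (ihval i hi (m+1) (by omega) le_rfl).1)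
      (fun i hi => by simpa using (ihval i hi (m+1) (by omega) le_rfl).2)
      (fun i => ihz i (m+2) (Or.inr (by omega)))
      a.length le_rfl
    obtain ⟨hunch, hnew, _⟩ := hinner
    refine ⟨?_, ?_⟩
    · intro i hi c hc1 hc2
      rcases Nat.lt_or_ge c (m+2) with hlt | hge
      · have h1 := (hunch i c (by omega)).1
        have h2 := (hunch i c (by omega)).2
        rw [hstep, h1, h2]
        exact ⟨(ihval i hi c hc1 (by omega)).1, (ihval i hi c hc1 (by omega)).2⟩
      · have : c = m+2 := by omega
        subst this
        rw [hstep]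
        have := hnew i hi
        simpa using this
    · intro i c hc
      have hcne : c ≠ m+2 := by omega
      rw [hstep, (hunch i c hcne).1, (hunch i c hcne).2]
      exact ihz i c (by omega)

theorem solve_eq_outer (S A B : String) :
    solve S A B = (outerAt S.toList A.toList B.toList (S.toList.length - 1)).1 A.toList.length S.toList.length
      + (outerAt S.toList A.toList B.toList (S.toList.length - 1)).2 A.toList.length S.toList.length := by
  simp [solve, outerAt, st1At]

theorem outer_zero_of_nil (s a b : List Char) (hA0 : a = []) (m : Nat) :
    outerAt s a b m = (fun _ _ => (0:Int), fun _ _ => (0:Int)) := by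
  induction m with
  | zero => simp [outerAt, st1At, hA0]
  | succ m ih =>
    have : outerAt s a b (m+1) = aOuter s a b (outerAt s a b m) m := by
      simp [outerAt, List.range_succ]
    rw [this, ih]
    simp [aOuter, hA0]

-- ===== VERDICT (by name: the statement is the Claim_ definition above) =====
theorem solve_spec : Claim_equal_solve := by
  intro S A B _ hPre
  unfold Spec_solve
  by_cases hA0 : A.toList = []
  · rw [solve_eq_outer, outer_zero_of_nil _ _ _ hA0]
    simp [solve_alt, hA0]
  · have hS : S.toList ≠ [] := by
      rcases hPre with h | h
      · exact absurd h hA0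
      · exact h.1
    set s := S.toList with hs
    set a := A.toList with ha
    set b := B.toList with hb
    have hN : 1 ≤ s.length := by
      cases hsc : s with
      | nil => exact absurd hsc hS
      | cons x xs => simp [hsc]
    have hfin := (outer_inv s a b (s.length - 1)).1 a.length le_rfl s.length hN (by omega)
    rw [solve_eq_outer, ← hs, ← ha, ← hb, hfin.1, hfin.2]
    have ht1 : ((colsP s a b (s.length - 1)).1.take a.length) = (colsP s a b (s.length - 1)).1 := by
      rw [← colsP_len1 s a b (s.length - 1), List.take_length]
    have ht2 : ((colsP s a b (s.length - 1)).2.take a.length) = (colsP s a b (s.length - 1)).2 := by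
      rw [← colsP_len2 s a b (s.length - 1), List.take_length]
    rw [ht1, ht2]
    have hL : a.length ≠ 0 := by
      cases hac : a with
      | nil => exact absurd hac hA0
      | cons x xs => simp [hac]
    simp only [solve_alt, ← hs, ← ha, ← hb]
    rw [if_neg (by omega)]
    rfl
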